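-- pv_equiv track=rewrite | github.com/LittleSheepy/MyMLStudy | 00datasets/00work/00LG/托盘定位.py | getLineCenterX
-- ===== SOURCE A (Python) =====
-- def getLineCenterX(lines_group, top_y):
--     # 帅选
--     # 去掉白色区域 计算中心点
--     lines_group_new = []
--     center_xs = []
--     dis_max_index = 0
--     dis_max = 0
--     for lines in lines_group:
--         xs = [line[0] for line in lines] + [line[2] for line in lines]
--         ys = [line[1] for line in lines] + [line[3] for line in lines]
--         xs_min, xs_max, ys_min, ys_max = min(xs), max(xs), min(ys), max(ys)
--         if ys_min < (top_y + 400) or ys_max > top_y + 1000: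
--             lines_group_new.append(lines)
--             # 中心
--             center_xs.append(int((xs_min + xs_max) / 2))
--             if len(center_xs) > 1:
--                 dis = center_xs[-1] - center_xs[-2]
--                 if dis > dis_max:
--                     dis_max = dis
--                     dis_max_index = len(center_xs) - 1
--     return lines_group_new, center_xs, dis_max_index
-- ===== SOURCE B (Python) =====
-- def getLineCenterX(lines_group, top_y):
--     # Two-phase rewrite: phase 1 filters groups and collects center xs;
--     # phase 2 finds the first strictly-greatest positive gap via max()+index().
--     lines_group_new = []
--     center_xs = []
--     for lines in lines_group:
--         xs = [line[i] for line in lines for i in (0, 2)]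
--         ys = [line[i] for line in lines for i in (1, 3)]
--         if min(ys) < top_y + 400 or max(ys) > top_y + 1000:
--             lines_group_new.append(lines)
--             center_xs.append(int((min(xs) + max(xs)) / 2))
--     gaps = [b - a for a, b in zip(center_xs, center_xs[1:])]
--     m = max(gaps, default=0)
--     dis_max_index = gaps.index(m) + 1 if m > 0 else 0
--     return lines_group_new, center_xs, dis_max_index
-- ===== Notes on version B (the rewrite author's own statement) =====
-- stated objective: simpler
-- what changed: A's single loop that interleaves filtering with running-max gap tracking over the last two appended centers is split into a filter/center pass followed by building the list of consecutive gaps and selecting the first strictly positive maximum with max()+index().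
import Mathlib
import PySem

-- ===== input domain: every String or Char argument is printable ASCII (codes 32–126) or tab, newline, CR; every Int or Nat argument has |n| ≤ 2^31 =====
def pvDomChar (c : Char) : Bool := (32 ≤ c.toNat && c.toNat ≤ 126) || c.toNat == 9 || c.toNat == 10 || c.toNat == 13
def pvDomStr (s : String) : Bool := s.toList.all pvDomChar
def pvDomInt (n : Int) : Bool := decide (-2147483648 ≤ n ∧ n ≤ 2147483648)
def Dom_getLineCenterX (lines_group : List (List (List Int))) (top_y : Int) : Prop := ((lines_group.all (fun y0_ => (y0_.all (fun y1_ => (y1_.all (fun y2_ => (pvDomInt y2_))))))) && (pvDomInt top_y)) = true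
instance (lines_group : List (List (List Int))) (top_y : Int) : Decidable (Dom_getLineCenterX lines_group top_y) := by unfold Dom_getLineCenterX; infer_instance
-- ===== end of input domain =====

-- B replaces A's single loop with inline running-max gap tracking by two phases: a filter/center
-- pass and then a gaps list whose first positive maximum is found with max()+index() (objective:
-- simpler decomposition; same asymptotic cost).

-- ===== PORT A =====
-- one iteration of A's 'for lines in lines_group' loop; state = (lines_group_new, center_xs, dis_max_index, dis_max)
-- int((xs_min+xs_max)/2) is PySem.Int.truncdiv: exact here since |xs_min+xs_max| ≤ 2^32 < 2^53 (float division by 2 is exact)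
def stepA (top_y : Int) (st : List (List (List Int)) × List Int × Int × Int)
    (lines : List (List Int)) : List (List (List Int)) × List Int × Int × Int :=
  let xs := lines.map (fun line => (PySem.List.pyGet? line 0).getD 0) ++
            lines.map (fun line => (PySem.List.pyGet? line 2).getD 0)
  let ys := lines.map (fun line => (PySem.List.pyGet? line 1).getD 0) ++
            lines.map (fun line => (PySem.List.pyGet? line 3).getD 0)
  let xs_min := (PySem.List.min? xs (fun v => v)).getD 0
  let xs_max := (PySem.List.max? xs (fun v => v)).getD 0
  let ys_min := (PySem.List.min? ys (fun v => v)).getD 0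
  let ys_max := (PySem.List.max? ys (fun v => v)).getD 0
  if ys_min < top_y + 400 ∨ ys_max > top_y + 1000 then
    let lgn := st.1 ++ [lines]
    let cxs := st.2.1 ++ [PySem.Int.truncdiv (xs_min + xs_max) 2]
    if 1 < cxs.length then
      let dis := (PySem.List.pyGet? cxs (-1)).getD 0 - (PySem.List.pyGet? cxs (-2)).getD 0
      if dis > st.2.2.2 then (lgn, cxs, (cxs.length : Int) - 1, dis)
      else (lgn, cxs, st.2.2.1, st.2.2.2)
    else (lgn, cxs, st.2.2.1, st.2.2.2)
  else st

def getLineCenterX (lines_group : List (List (List Int))) (top_y : Int) :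
    List (List (List Int)) × List Int × Int :=
  let st := lines_group.foldl (stepA top_y) ([], [], 0, 0)
  (st.1, st.2.1, st.2.2.1)

-- ===== PORT B =====
-- phase 1 of B: filter the groups and collect the center xs; state = (lines_group_new, center_xs)
def stepB (top_y : Int) (st : List (List (List Int)) × List Int)
    (lines : List (List Int)) : List (List (List Int)) × List Int :=
  let xs := lines.map (fun line => (PySem.List.pyGet? line 0).getD 0) ++
            lines.map (fun line => (PySem.List.pyGet? line 2).getD 0)
  let ys := lines.map (fun line => (PySem.List.pyGet? line 1).getD 0) ++
            lines.map (fun line => (PySem.List.pyGet? line 3).getD 0)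
  if (PySem.List.min? ys (fun v => v)).getD 0 < top_y + 400 ∨
     (PySem.List.max? ys (fun v => v)).getD 0 > top_y + 1000 then
    (st.1 ++ [lines],
     st.2 ++ [PySem.Int.truncdiv ((PySem.List.min? xs (fun v => v)).getD 0 +
                                  (PySem.List.max? xs (fun v => v)).getD 0) 2])
  else st

def getLineCenterX_alt (lines_group : List (List (List Int))) (top_y : Int) :
    List (List (List Int)) × List Int × Int :=
  let st := lines_group.foldl (stepB top_y) ([], [])
  let gaps := (st.2.zip (PySem.List.slice st.2 (some 1) none)).map (fun p => p.2 - p.1)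
  let m := (PySem.List.max? gaps (fun v => v)).getD 0
  (st.1, st.2, if 0 < m then ((PySem.List.index? gaps m).getD 0 : Int) + 1 else 0)

-- ===== PRECONDITION & SPEC =====
-- Pre_ excludes exactly the inputs where Python A raises: a group with no lines (ValueError from
-- min([])) or a line with fewer than 4 coordinates (IndexError on line[3]).
def Pre_getLineCenterX (lines_group : List (List (List Int))) (top_y : Int) : Prop :=
  ∀ lines ∈ lines_group, lines ≠ [] ∧ ∀ line ∈ lines, 4 ≤ line.length
instance (lines_group : List (List (List Int))) (top_y : Int) : Decidable (Pre_getLineCenterX lines_group top_y) := by unfold Pre_getLineCenterX; infer_instance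
def pvWitness_getLineCenterX : List (List (List Int)) × Int :=
  ([[[0, 10, 5, 20]], [[100, 900, 120, 950]], [[300, 10, 350, 30]]], 0)

def Spec_getLineCenterX (lines_group : List (List (List Int))) (top_y : Int) (out : List (List (List Int)) × List Int × Int) : Prop := out = getLineCenterX_alt lines_group top_y
instance (lines_group : List (List (List Int))) (top_y : Int) (out : List (List (List Int)) × List Int × Int) : Decidable (Spec_getLineCenterX lines_group top_y out) := by unfold Spec_getLineCenterX; infer_instance

-- ===== CLAIM (what is proved, stated in full; the proofs are below) =====
def Claim_equal_getLineCenterX : Prop := ∀ (lines_group : List (List (List Int))) (top_y : Int), Dom_getLineCenterX lines_group top_y → Pre_getLineCenterX lines_group top_y → Spec_getLineCenterX lines_group top_y (getLineCenterX lines_group top_y)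

-- ===== LEMMAS AND PROOFS =====

-- the gaps list of B's phase 2, and A's running scan over it (dis_max_index, dis_max, next 1-based position)
def gapsOf (c : List Int) : List Int := (c.zip c.tail).map (fun p => p.2 - p.1)

def scanG (g : List Int) : Int × Int × Int :=
  g.foldl (fun st d => if d > st.2.1 then (st.2.2, d, st.2.2 + 1) else (st.1, st.2.1, st.2.2 + 1))
    (0, 0, 1)

theorem gapsOf_append_last (c : List Int) (x : Int) (h : c ≠ []) :
    gapsOf (c ++ [x]) = gapsOf c ++ [x - c.getLast h] := by
  induction c with
  | nil => exact absurd rfl h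
  | cons y t ih =>
    cases t with
    | nil => simp [gapsOf]
    | cons z t' => simpa [gapsOf, List.getLast] using ih (by simp)

theorem scanG_append (g : List Int) (d : Int) :
    scanG (g ++ [d]) =
      if d > (scanG g).2.1 then ((scanG g).2.2, d, (scanG g).2.2 + 1)
      else ((scanG g).1, (scanG g).2.1, (scanG g).2.2 + 1) := by
  simp [scanG, List.foldl_append]

theorem scanG_counter (g : List Int) : (scanG g).2.2 = (g.length : Int) + 1 := by
  induction g using List.reverseRecOn with
  | nil => rfl
  | append_singleton g d ih =>
    rw [scanG_append]
    split <;> simp [ih]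

theorem foldl_max_comm (t : List Int) (a b : Int) :
    t.foldl max (max a b) = max a (t.foldl max b) := by
  induction t generalizing b with
  | nil => rfl
  | cons y t' ih => simpa [max_assoc] using ih (max b y)

theorem foldl_max_mem (t : List Int) (x : Int) : t.foldl max x = x ∨ t.foldl max x ∈ t := by
  induction t generalizing x with
  | nil => simp
  | cons y t' ih =>
    simp only [List.foldl_cons]
    rcases ih (max x y) with h | h
    · rcases le_total y x with hxy | hxy
      · left; rw [h, max_eq_left hxy]
      · right; rw [h, max_eq_right hxy]; exact List.mem_cons_self
    · right; exact List.mem_cons_of_mem _ h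

theorem scanG_dm (g : List Int) : (scanG g).2.1 = g.foldl max 0 := by
  induction g using List.reverseRecOn with
  | nil => rfl
  | append_singleton g d ih =>
    rw [scanG_append, List.foldl_append]
    split <;> rename_i h <;> simp [ih] at h ⊢ <;> omega

theorem scanG_dmi (g : List Int) :
    (scanG g).1 =
      if 0 < g.foldl max 0 then ((PySem.List.index? g (g.foldl max 0)).getD 0 : Int) + 1
      else 0 := by
  induction g using List.reverseRecOn with
  | nil => rfl
  | append_singleton g d ih =>
    rw [scanG_append, List.foldl_append]
    simp only [List.foldl_cons, List.foldl_nil, scanG_dm]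
    by_cases h : g.foldl max 0 < d
    · rw [if_pos h, max_eq_right h.le]
      have hd0 : 0 < d := lt_of_le_of_lt (PySem.List.le_foldl_max g 0).1 h
      have hnot : d ∉ g := fun hm => absurd ((PySem.List.le_foldl_max g 0).2 d hm) (not_le.mpr h)
      rw [if_pos hd0, PySem.List.index?_append_singleton_self _ _ hnot, scanG_counter]
      simp
    · rw [not_lt] at h
      rw [if_neg (not_lt.mpr h), max_eq_left h, ih]
      by_cases h0 : 0 < g.foldl max 0
      · have hmem : g.foldl max 0 ∈ g := by
          rcases foldl_max_mem g 0 with he | he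
          · omega
          · exact he
        rw [if_pos h0, if_pos h0, PySem.List.index?_append_of_mem _ hmem]
      · rw [if_neg h0, if_neg h0]

-- one loop iteration: A's step on a state carrying the scan of the accumulated centers
theorem step_char (ty : Int) (k : List (List (List Int))) (c : List Int) (a : List (List Int)) :
    stepA ty (k, c, (scanG (gapsOf c)).1, (scanG (gapsOf c)).2.1) a =
      ((stepB ty (k, c) a).1, (stepB ty (k, c) a).2,
       (scanG (gapsOf (stepB ty (k, c) a).2)).1,
       (scanG (gapsOf (stepB ty (k, c) a).2)).2.1) := by
  by_cases h :
      (PySem.List.min? (a.map (fun line => (PySem.List.pyGet? line 1).getD 0) ++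
          a.map (fun line => (PySem.List.pyGet? line 3).getD 0)) (fun v => v)).getD 0 < ty + 400 ∨
      (PySem.List.max? (a.map (fun line => (PySem.List.pyGet? line 1).getD 0) ++
          a.map (fun line => (PySem.List.pyGet? line 3).getD 0)) (fun v => v)).getD 0 > ty + 1000
  · simp only [stepA, stepB, if_pos h]
    set x := PySem.Int.truncdiv
        ((PySem.List.min? (a.map (fun line => (PySem.List.pyGet? line 0).getD 0) ++
            a.map (fun line => (PySem.List.pyGet? line 2).getD 0)) (fun v => v)).getD 0 +
         (PySem.List.max? (a.map (fun line => (PySem.List.pyGet? line 0).getD 0) ++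
            a.map (fun line => (PySem.List.pyGet? line 2).getD 0)) (fun v => v)).getD 0) 2 with hx
    cases c with
    | nil =>
      rw [if_neg (by simp)]
      norm_num [gapsOf, scanG]
    | cons c0 ct =>
      have hne : (c0 :: ct) ≠ [] := by simp
      rw [if_pos (by simp)]
      have h1 : (PySem.List.pyGet? ((c0 :: ct) ++ [x]) (-1)).getD 0 = x := by
        rw [PySem.List.pyGet?_neg_one_append_singleton]; rfl
      have h2 : (PySem.List.pyGet? ((c0 :: ct) ++ [x]) (-2)).getD 0 = (c0 :: ct).getLast hne := by
        rw [PySem.List.pyGet?_neg_ofNat ((c0 :: ct) ++ [x]) 2 (by omega) (by simp)]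
        rw [List.getElem?_append_left (by simp), List.getLast_eq_getElem]
        simp
        try rfl
      rw [h1, h2, gapsOf_append_last (c0 :: ct) x hne, scanG_append]
      by_cases hgt : x - (c0 :: ct).getLast hne > (scanG (gapsOf (c0 :: ct))).2.1
      · rw [if_pos hgt, if_pos hgt, scanG_counter]
        have hg : (gapsOf (c0 :: ct)).length = ct.length := by simp [gapsOf]
        rw [hg]
        simp
        try omega
      · rw [if_neg hgt, if_neg hgt]
  · simp only [stepA, stepB, if_neg h]

-- A's fold = B's phase 1 together with the scan over the gaps of the accumulated centers
theorem foldA_char (top_y : Int) (lg : List (List (List Int))) :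
    lg.foldl (stepA top_y) ([], [], 0, 0) =
      ((lg.foldl (stepB top_y) ([], [])).1,
       (lg.foldl (stepB top_y) ([], [])).2,
       (scanG (gapsOf (lg.foldl (stepB top_y) ([], [])).2)).1,
       (scanG (gapsOf (lg.foldl (stepB top_y) ([], [])).2)).2.1) := by
  induction lg using List.reverseRecOn with
  | nil => rfl
  | append_singleton lg a ih =>
    rw [List.foldl_append, List.foldl_append, ih]
    simp only [List.foldl_cons, List.foldl_nil]
    rw [step_char top_y (lg.foldl (stepB top_y) ([], [])).1 (lg.foldl (stepB top_y) ([], [])).2 a]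

-- B's max+index selection equals the scan's index
theorem bridge_dmi (g : List Int) :
    (if 0 < (PySem.List.max? g (fun v => v)).getD 0 then
       ((PySem.List.index? g ((PySem.List.max? g (fun v => v)).getD 0)).getD 0 : Int) + 1
     else 0) = (scanG g).1 := by
  rw [scanG_dmi]
  cases g with
  | nil => rfl
  | cons x t =>
    rw [PySem.List.max?_id_cons]
    have hfold : (x :: t).foldl max 0 = max 0 (t.foldl max x) := by
      simp only [List.foldl_cons]
      exact foldl_max_comm t 0 x
    rw [hfold]
    simp only [Option.getD_some]
    by_cases h : 0 < t.foldl max x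
    · rw [if_pos h, if_pos (by omega : (0:Int) < max 0 (t.foldl max x)),
          max_eq_right h.le]
    · rw [if_neg h, if_neg (by omega : ¬ (0:Int) < max 0 (t.foldl max x))]

-- ===== VERDICT (by name: the statement is the Claim_ definition above) =====
theorem getLineCenterX_spec : Claim_equal_getLineCenterX := by
  unfold Claim_equal_getLineCenterX
  intro lg ty _ _
  unfold Spec_getLineCenterX getLineCenterX getLineCenterX_alt
  simp only [PySem.List.slice_from_one]
  rw [foldA_char, bridge_dmi]
  rfl
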